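-- pv_equiv track=rewrite | github.com/qawesrdtfy/CAT | utils.py | get_head
-- ===== SOURCE A (Python) =====
-- def get_head(levels, xs):
--     head = []
--     for level in levels:
--         found = False
--         for x in xs:
--             if x in level:
--                 head.append(x)
--                 found = True
--         if found:
--             break
--     return head
-- ===== SOURCE B (Python) =====
-- def get_head(levels, xs):
--     first = {}
--     for i, level in enumerate(levels):
--         for v in level:
--             if v not in first:
--                 first[v] = i
--     t = min((first[x] for x in xs if x in first), default=None)
--     if t is None:
--         return []
--     return [x for x in xs if first.get(x) == t]
-- ===== Notes on version B (the rewrite author's own statement) =====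
-- stated objective: alternative
-- what changed: Replaced A's nested first-match scan (each level scanned against xs with list membership, breaking at the first hit) by a hash index mapping every element to its first level index; the target level index is the minimum index over xs and the result is xs filtered by index equality.
import Mathlib
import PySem

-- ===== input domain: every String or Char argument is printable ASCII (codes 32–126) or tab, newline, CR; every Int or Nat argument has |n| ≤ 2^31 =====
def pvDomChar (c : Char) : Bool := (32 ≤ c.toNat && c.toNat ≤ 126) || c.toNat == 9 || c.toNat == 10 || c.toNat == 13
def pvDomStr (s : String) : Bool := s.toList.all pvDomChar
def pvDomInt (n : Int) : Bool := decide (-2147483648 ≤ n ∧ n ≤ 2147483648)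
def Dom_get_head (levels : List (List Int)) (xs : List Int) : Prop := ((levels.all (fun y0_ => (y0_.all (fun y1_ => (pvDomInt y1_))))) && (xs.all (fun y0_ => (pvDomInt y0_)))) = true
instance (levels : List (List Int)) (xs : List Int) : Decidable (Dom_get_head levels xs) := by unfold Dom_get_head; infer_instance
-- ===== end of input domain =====

-- B replaces A's nested level scans by a hash index: one pass records each element's
-- first-occurrence level index, the target level index is the minimum index over xs,
-- and the result is the xs whose index equals it (objective: alternative algorithm).

-- ===== PORT A =====
-- the inner 'for x in xs' loop: state (head, found)
def get_head_inner (level : List Int) (xs : List Int) (st : List Int × Bool) : List Int × Bool :=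
  xs.foldl (fun p x => if level.contains x then (p.1 ++ [x], true) else p) st

-- the outer 'for level in levels' loop with break
def get_head_loop (levels : List (List Int)) (xs : List Int) (head : List Int) : List Int :=
  match levels with
  | [] => head
  | level :: rest =>
    let p := get_head_inner level xs (head, false)
    if p.2 then p.1 else get_head_loop rest xs p.1

def get_head (levels : List (List Int)) (xs : List Int) : List Int :=
  get_head_loop levels xs []

-- ===== PORT B =====
-- 'for i, level in enumerate(levels): for v in level: if v not in first: first[v] = i'
def get_head_first (levels : List (List Int)) : PySem.Dict Int Int :=
  (PySem.List.enumerate levels 0).foldl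
    (fun d p => p.2.foldl (fun d v => if d.contains v then d else d.insert v p.1) d)
    PySem.Dict.empty

def get_head_alt (levels : List (List Int)) (xs : List Int) : List Int :=
  let first := get_head_first levels
  -- t = min((first[x] for x in xs if x in first), default=None)
  match PySem.List.min? (xs.filterMap (fun x => first.get? x)) (fun y => y) with
  | none => []
  | some t => xs.filter (fun x => first.get? x == some t)

-- ===== PRECONDITION & SPEC =====
def Spec_get_head (levels : List (List Int)) (xs : List Int) (out : List Int) : Prop := out = get_head_alt levels xs
instance (levels : List (List Int)) (xs : List Int) (out : List Int) : Decidable (Spec_get_head levels xs out) := by unfold Spec_get_head; infer_instance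

-- ===== CLAIM (what is proved, stated in full; the proofs are below) =====
def Claim_equal_get_head : Prop := ∀ (levels : List (List Int)) (xs : List Int), Dom_get_head levels xs → Spec_get_head levels xs (get_head levels xs)

-- ===== LEMMAS AND PROOFS =====

-- first-occurrence level index of x in levels (proof-side characterisation of the dict)
def fIdx (levels : List (List Int)) (x : Int) : Option Int :=
  match levels with
  | [] => none
  | l :: ls => if x ∈ l then some 0 else (fIdx ls x).map (· + 1)

theorem fIdx_nonneg (levels : List (List Int)) (x : Int) (k : Int) (h : fIdx levels x = some k) : 0 ≤ k := by
  induction levels generalizing k with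
  | nil => simp [fIdx] at h
  | cons l ls ih =>
    by_cases hx : x ∈ l
    · simp [fIdx, hx] at h; omega
    · simp [fIdx, hx] at h
      obtain ⟨m, hm, hk⟩ := h
      have := ih m hm; omega

theorem inner_get? (lvl : List Int) (i : Int) (d : PySem.Dict Int Int) (x : Int) :
    (lvl.foldl (fun d v => if d.contains v then d else d.insert v i) d).get? x
      = (d.get? x).or (if x ∈ lvl then some i else none) := by
  induction lvl generalizing d with
  | nil => simp
  | cons v vs ih =>
    simp only [List.foldl_cons]
    by_cases hc : d.contains v = true
    · rw [if_pos hc, ih]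
      by_cases hvx : x = v
      · subst hvx
        rw [PySem.Dict.contains_eq_isSome_get?] at hc
        obtain ⟨w, hw⟩ := Option.isSome_iff_exists.mp hc
        simp [hw]
      · simp [List.mem_cons, hvx]
    · rw [if_neg hc, ih]
      by_cases hvx : x = v
      · subst hvx
        rw [PySem.Dict.contains_eq_isSome_get?] at hc
        have : d.get? x = none := by
          cases h : d.get? x with
          | none => rfl
          | some w => rw [h] at hc; simp at hc
        simp [this, PySem.Dict.get?_insert_self]
      · rw [PySem.Dict.get?_insert_of_ne _ _ hvx]
        simp [List.mem_cons, hvx]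

theorem outer_get? (levels : List (List Int)) (s : Int) (d : PySem.Dict Int Int) (x : Int) :
    ((PySem.List.enumerate levels s).foldl
        (fun d p => p.2.foldl (fun d v => if d.contains v then d else d.insert v p.1) d) d).get? x
      = (d.get? x).or ((fIdx levels x).map (· + s)) := by
  induction levels generalizing s d with
  | nil => simp [PySem.List.enumerate_nil, fIdx]
  | cons l ls ih =>
    rw [PySem.List.enumerate_cons]
    simp only [List.foldl_cons]
    rw [ih, inner_get?]
    by_cases hx : x ∈ l
    · simp [fIdx, hx]
    · simp only [fIdx, hx, if_false, Option.or_assoc]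
      cases h : fIdx ls x with
      | none => simp
      | some k =>
        have hk : k + 1 + s = k + (s + 1) := by ring
        simp [hk]

theorem first_get? (levels : List (List Int)) (x : Int) :
    (get_head_first levels).get? x = fIdx levels x := by
  unfold get_head_first
  rw [outer_get?]
  simp

-- min over a (+1)-shifted list
theorem foldl_min_add_one (t : List Int) (x : Int) :
    (t.map (· + 1)).foldl min (x + 1) = t.foldl min x + 1 := by
  induction t generalizing x with
  | nil => simp
  | cons y ys ih =>
    simp only [List.map_cons, List.foldl_cons]
    rw [min_add_add_right]
    exact ih (min x y)

theorem min?_map_add_one (l : List Int) :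
    PySem.List.min? (l.map (· + 1)) (fun y => y) = (PySem.List.min? l (fun y => y)).map (· + 1) := by
  cases l with
  | nil => simp [PySem.List.min?]
  | cons x t =>
    rw [List.map_cons, PySem.List.min?_id_cons, PySem.List.min?_id_cons]
    simp [foldl_min_add_one]

-- B expressed through fIdx
theorem alt_eq_fIdx (levels : List (List Int)) (xs : List Int) :
    get_head_alt levels xs
      = match PySem.List.min? (xs.filterMap (fIdx levels)) (fun y => y) with
        | none => []
        | some t => xs.filter (fun x => fIdx levels x == some t) := by
  unfold get_head_alt
  simp only [first_get?]

-- A-side: the inner loop appends the matching xs and reports whether any matched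
theorem get_head_inner_eq (level : List Int) (xs : List Int) (h : List Int) (b : Bool) :
    get_head_inner level xs (h, b)
      = (h ++ xs.filter (fun x => level.contains x), b || xs.any (fun x => level.contains x)) := by
  induction xs generalizing h b with
  | nil => simp [get_head_inner]
  | cons x xs ih =>
    have step : get_head_inner level (x :: xs) (h, b)
        = get_head_inner level xs (if level.contains x then (h ++ [x], true) else (h, b)) := rfl
    rw [step]
    by_cases hx : level.contains x = true
    · rw [if_pos hx, ih]
      have hx' : x ∈ level := by simpa using hx
      simp [hx']
    · rw [if_neg hx, ih]
      rw [Bool.not_eq_true] at hx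
      have hx' : x ∉ level := by simpa using hx
      simp [hx']

theorem main_eq (levels : List (List Int)) (xs : List Int) :
    get_head_loop levels xs [] = get_head_alt levels xs := by
  rw [alt_eq_fIdx]
  induction levels with
  | nil => simp [get_head_loop, fIdx, PySem.List.min?]
  | cons level rest ih =>
    have step : get_head_loop (level :: rest) xs []
        = (if (get_head_inner level xs ([], false)).2
            then (get_head_inner level xs ([], false)).1
            else get_head_loop rest xs (get_head_inner level xs ([], false)).1) := rfl
    rw [step, get_head_inner_eq]
    by_cases hany : (xs.any fun x => level.contains x) = true
    · -- some x ∈ xs lies in level: A stops here; B's minimum index is 0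
      rw [if_pos (by simpa using hany)]
      obtain ⟨x0, hx0mem, hx0in⟩ := List.any_eq_true.mp hany
      have hx0in' : x0 ∈ level := by simpa using hx0in
      -- 0 is in the filterMap list
      have h0mem : (0 : Int) ∈ xs.filterMap (fIdx (level :: rest)) := by
        refine List.mem_filterMap.mpr ⟨x0, hx0mem, ?_⟩
        simp [fIdx, hx0in']
      -- every element of the list is ≥ 0
      have hnn : ∀ k ∈ xs.filterMap (fIdx (level :: rest)), (0 : Int) ≤ k := by
        intro k hk
        obtain ⟨x, _, hfx⟩ := List.mem_filterMap.mp hk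
        exact fIdx_nonneg _ _ _ hfx
      cases hmin : PySem.List.min? (xs.filterMap (fIdx (level :: rest))) (fun y => y) with
      | none =>
        exact absurd (List.ne_nil_of_mem h0mem)
          (by simpa using (PySem.List.min?_eq_none_iff _ _).mp hmin)
      | some t =>
        have htmem := PySem.List.min?_mem hmin
        have ht0 : t ≤ 0 := PySem.List.min?_isMin hmin 0 h0mem
        have h0t : 0 ≤ t := hnn t htmem
        have ht : t = 0 := le_antisymm ht0 h0t
        subst ht
        simp only [List.nil_append]
        apply List.filter_congr
        intro x hx
        by_cases hxl : x ∈ level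
        · simp [fIdx, hxl]
        · simp only [fIdx, hxl, if_false]
          cases hf : fIdx rest x with
          | none => simp [hxl]
          | some k =>
            have := fIdx_nonneg rest x k hf
            simp [hxl]
            omega
    · -- no x ∈ xs lies in level: A continues; on xs, fIdx (level::rest) = (fIdx rest).map (+1)
      rw [Bool.not_eq_true] at hany
      have hneg : ¬ (false || xs.any fun x => level.contains x) = true := by
        rw [Bool.false_or, hany]; simp
      rw [if_neg hneg]
      have hnotin : ∀ x ∈ xs, x ∉ level := by
        intro x hx
        have := List.any_eq_false.mp hany x hx
        simpa using this
      have hfil : xs.filter (fun x => level.contains x) = [] := by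
        rw [List.filter_eq_nil_iff]
        intro x hx
        simpa using hnotin x hx
      simp only [List.nil_append, hfil]
      rw [ih]
      have hfm : xs.filterMap (fIdx (level :: rest)) = (xs.filterMap (fIdx rest)).map (· + 1) := by
        rw [List.map_filterMap]
        apply List.filterMap_congr
        intro x hx
        simp [fIdx, hnotin x hx]
      rw [hfm, min?_map_add_one]
      cases hmin : PySem.List.min? (xs.filterMap (fIdx rest)) (fun y => y) with
      | none => simp
      | some k =>
        simp only [Option.map_some]
        apply List.filter_congr
        intro x hx
        simp only [fIdx, hnotin x hx, if_false]
        cases hf : fIdx rest x with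
        | none => simp
        | some m => simp

-- ===== VERDICT (by name: the statement is the Claim_ definition above) =====
theorem get_head_spec : Claim_equal_get_head := by
  intro levels xs _
  unfold Spec_get_head get_head
  exact main_eq levels xs
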